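-- pv_equiv track=rewrite | github.com/Ashwin1234/Ashwin1234-Leetcode-Premium-Solutions | 1332-remove-palindromic-subsequences/1332-remove-palindromic-subsequences.py | removePalindromeSub
-- ===== SOURCE A (Python) =====
-- def removePalindromeSub(s: str) -> int:
--     left = 0
--     right = len(s) - 1
--     isPal = 1
--     while(left <= right):
--         if s[left] != s[right]:
--             isPal = 0
--             break
--         left = left + 1
--         right = right - 1
--     if isPal == 1:
--         return 1
--     else:
--         return 2
-- ===== SOURCE B (Python) =====
-- def removePalindromeSub(s: str) -> int:
--     return 1 if s == s[::-1] else 2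
-- ===== Notes on version B (the rewrite author's own statement) =====
-- stated objective: idiomatic
-- what changed: Replaces the manual two-pointer inward walk with early break by materializing the full reversed string via slicing and one whole-string equality test.
import Mathlib
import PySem

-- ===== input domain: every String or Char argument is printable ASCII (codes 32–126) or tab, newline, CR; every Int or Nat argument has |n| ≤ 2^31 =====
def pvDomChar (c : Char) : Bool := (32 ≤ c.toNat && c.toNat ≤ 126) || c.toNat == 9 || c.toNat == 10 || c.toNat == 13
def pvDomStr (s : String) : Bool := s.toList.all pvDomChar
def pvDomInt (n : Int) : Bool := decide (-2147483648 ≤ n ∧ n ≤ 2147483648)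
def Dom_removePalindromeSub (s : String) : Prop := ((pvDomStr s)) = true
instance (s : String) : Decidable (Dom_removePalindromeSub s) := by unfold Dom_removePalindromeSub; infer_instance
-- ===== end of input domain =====

-- B replaces A's two-pointer inward walk by the idiomatic reversed-slice comparison (same cost; clearer).

-- ===== PORT A =====
-- the while-loop of A: left/right pointers walking inward; 0 on mismatch (break with isPal = 0), 1 when they cross
def pvLoopA (cs : List Char) (l r : Int) : Int :=
  if _h : l ≤ r then
    if PySem.List.pyGet? cs l ≠ PySem.List.pyGet? cs r then 0
    else pvLoopA cs (l + 1) (r - 1)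
  else 1
termination_by (r + 1 - l).toNat
decreasing_by omega

def removePalindromeSub (s : String) : Int :=
  let isPal := pvLoopA s.toList 0 (PySem.Str.len s - 1)
  if isPal = 1 then 1 else 2

-- ===== PORT B =====
def removePalindromeSub_alt (s : String) : Int :=
  if PySem.Str.slice? s none none (-1) = some s then 1 else 2

-- ===== PRECONDITION & SPEC =====
def Spec_removePalindromeSub (s : String) (out : Int) : Prop := out = removePalindromeSub_alt s
instance (s : String) (out : Int) : Decidable (Spec_removePalindromeSub s out) := by unfold Spec_removePalindromeSub; infer_instance

-- ===== CLAIM (what is proved, stated in full; the proofs are below) =====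
def Claim_equal_removePalindromeSub : Prop := ∀ (s : String), Dom_removePalindromeSub s → Spec_removePalindromeSub s (removePalindromeSub s)

-- ===== LEMMAS AND PROOFS =====

theorem pvLoopA_eq_one_iff (cs : List Char) (l r : Int) :
    pvLoopA cs l r = 1 ↔
      ∀ i : Int, l ≤ i → i ≤ r → PySem.List.pyGet? cs i = PySem.List.pyGet? cs (l + r - i) := by
  induction l, r using pvLoopA.induct cs with
  | case1 l r h hne =>
    rw [pvLoopA]
    simp only [dif_pos h, if_pos hne]
    constructor
    · intro h10; exact absurd h10 (by decide)
    · intro hall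
      exact absurd (by have := hall l le_rfl h; simpa using this) hne
  | case2 l r h heq ih =>
    rw [pvLoopA]
    simp only [dif_pos h, if_neg heq]
    rw [ih]
    rw [not_not] at heq
    constructor
    · intro hall i hl hr
      rcases eq_or_lt_of_le hl with rfl | hl'
      · simpa using heq
      rcases eq_or_lt_of_le hr with rfl | hr'
      · have : l + i - i = l := by omega
        rw [this]; exact heq.symm
      · have := hall i (by omega) (by omega)
        have e : l + 1 + (r - 1) - i = l + r - i := by omega
        rwa [e] at this
    · intro hall i hl hr
      have := hall i (by omega) (by omega)
      have e : l + 1 + (r - 1) - i = l + r - i := by omega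
      rwa [e]
  | case3 l r h =>
    rw [pvLoopA]
    simp only [dif_neg h]
    constructor
    · intro _ i hl hr; omega
    · intro _; trivial

theorem pal_iff_reverse (cs : List Char) :
    (∀ i : Int, 0 ≤ i → i ≤ (cs.length : Int) - 1 →
        PySem.List.pyGet? cs i = PySem.List.pyGet? cs (0 + ((cs.length : Int) - 1) - i)) ↔
      cs.reverse = cs := by
  constructor
  · intro hall
    apply List.ext_getElem (by simp)
    intro k h1 h2
    rw [List.getElem_reverse]
    have hk : k < cs.length := h2
    have := hall (k : Int) (by positivity) (by omega)
    have e : 0 + ((cs.length : Int) - 1) - (k : Int) = ((cs.length - 1 - k : Nat) : Int) := by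
      omega
    rw [e, PySem.List.pyGet?_natCast, PySem.List.pyGet?_natCast] at this
    rw [List.getElem?_eq_getElem hk, List.getElem?_eq_getElem (by omega)] at this
    exact (Option.some.inj this).symm
  · intro hrev i h0 hi
    have hk : i.toNat < cs.length := by omega
    have e1 : i = ((i.toNat : Nat) : Int) := by omega
    have e2 : 0 + ((cs.length : Int) - 1) - i = ((cs.length - 1 - i.toNat : Nat) : Int) := by
      omega
    rw [PySem.List.pyGet?_of_nonneg cs h0, PySem.List.pyGet?_of_nonneg cs (by omega : (0:Int) ≤ 0 + ((cs.length : Int) - 1) - i)]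
    have e3 : (0 + ((cs.length : Int) - 1) - i).toNat = cs.length - 1 - i.toNat := by omega
    rw [e3, List.getElem?_eq_getElem hk, List.getElem?_eq_getElem (by omega)]
    have h4 := List.getElem?_reverse (l := cs) (i := i.toNat) hk
    rw [hrev] at h4
    rw [List.getElem?_eq_getElem (by simpa using hk), List.getElem?_eq_getElem (by omega)] at h4
    exact h4

-- ===== VERDICT (by name: the statement is the Claim_ definition above) =====
theorem removePalindromeSub_spec : Claim_equal_removePalindromeSub := by
  intro s _
  unfold Spec_removePalindromeSub removePalindromeSub removePalindromeSub_alt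
  rw [PySem.Str.slice?_none_none_neg_one]
  have ha : pvLoopA s.toList 0 ((s.toList.length : Int) - 1) = 1 ↔
      s.toList.reverse = s.toList := by
    rw [pvLoopA_eq_one_iff]
    exact pal_iff_reverse s.toList
  have hb : (some (String.ofList s.toList.reverse) = some s) ↔ s.toList.reverse = s.toList := by
    constructor
    · intro h
      simpa using congrArg String.toList (Option.some.inj h)
    · intro h
      rw [h]
      simp [String.ofList]
  have hlen : PySem.Str.len s - 1 = (s.toList.length : Int) - 1 := by
    simp
  by_cases hc : s.toList.reverse = s.toList
  · rw [if_pos (hb.mpr hc)]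
    simp only [hlen]
    rw [if_pos (ha.mpr hc)]
  · rw [if_neg (fun h => hc (hb.mp h))]
    simp only [hlen]
    rw [if_neg (fun h => hc (ha.mp h))]
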